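-- pv_equiv track=rewrite | github.com/TheRagingRyan/Dokkan-Unit-Creation-Tool | modules/categories.py | Table_ID
-- ===== SOURCE A (Python) =====
-- def Table_ID(app_data):
--     Table_Number = ''
--     for char in reversed(app_data):
--             if char.isdigit():
--                 Table_Number += char
--             else:
--                 break
--     return Table_Number
-- ===== SOURCE B (Python) =====
-- def Table_ID(app_data):
--     run = ''
--     for char in app_data:
--         if char.isdigit():
--             run += char
--         else:
--             run = ''
--     return run[::-1]
-- ===== Notes on version B (the rewrite author's own statement) =====
-- stated objective: alternative
-- what changed: B replaces A's backward scan with early break by a single forward pass that maintains the current consecutive-digit run (reset on non-digits) and reverses it at the end.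
import Mathlib
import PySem

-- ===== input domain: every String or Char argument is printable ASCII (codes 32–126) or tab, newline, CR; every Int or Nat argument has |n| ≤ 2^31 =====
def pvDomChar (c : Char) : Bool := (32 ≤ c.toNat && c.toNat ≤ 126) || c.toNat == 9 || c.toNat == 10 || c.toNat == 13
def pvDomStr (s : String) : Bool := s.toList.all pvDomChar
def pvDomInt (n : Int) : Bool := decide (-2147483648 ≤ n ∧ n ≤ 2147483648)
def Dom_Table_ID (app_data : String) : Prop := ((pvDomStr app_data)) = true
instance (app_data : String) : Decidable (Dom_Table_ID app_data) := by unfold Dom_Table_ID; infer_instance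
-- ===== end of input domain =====

-- ===== PORT A =====
-- loop over reversed(app_data), appending digits, break at first non-digit
def tableLoopA : List Char → List Char → List Char
  | acc, [] => acc
  | acc, c :: rest => if PySem.Chars.isdigit c then tableLoopA (acc ++ [c]) rest else acc

def Table_ID (app_data : String) : String :=
  String.mk (tableLoopA [] app_data.toList.reverse)

-- ===== PORT B =====
-- forward pass keeping the current consecutive-digit run, reset on non-digit; reversed at the end
def Table_ID_alt (app_data : String) : String :=
  String.mk ((app_data.toList.foldl
    (fun run c => if PySem.Chars.isdigit c then run ++ [c] else []) []).reverse)

-- ===== PRECONDITION & SPEC =====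
def Spec_Table_ID (app_data : String) (out : String) : Prop := out = Table_ID_alt app_data
instance (app_data : String) (out : String) : Decidable (Spec_Table_ID app_data out) := by unfold Spec_Table_ID; infer_instance

-- ===== CLAIM (what is proved, stated in full; the proofs are below) =====
def Claim_equal_Table_ID : Prop := ∀ (app_data : String), Dom_Table_ID app_data → Spec_Table_ID app_data (Table_ID app_data)

-- ===== LEMMAS AND PROOFS =====

-- ===== VERDICT (by name: the statement is the Claim_ definition above) =====
theorem tableLoopA_eq (l acc : List Char) :
    tableLoopA acc l = acc ++ l.takeWhile PySem.Chars.isdigit := by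
  induction l generalizing acc with
  | nil => simp [tableLoopA]
  | cons c rest ih =>
    simp only [tableLoopA, List.takeWhile]
    by_cases h : PySem.Chars.isdigit c
    · simp [h, ih]
    · simp [h]

theorem foldl_run_eq (l : List Char) :
    l.foldl (fun run c => if PySem.Chars.isdigit c then run ++ [c] else []) []
      = (l.reverse.takeWhile PySem.Chars.isdigit).reverse := by
  induction l using List.reverseRecOn with
  | nil => simp
  | append_singleton l' c ih =>
    rw [List.foldl_append, List.foldl_cons, List.foldl_nil, ih]
    by_cases h : PySem.Chars.isdigit c
    · simp [h]
    · simp [h]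

theorem Table_ID_spec : Claim_equal_Table_ID := by
  intro s _
  unfold Spec_Table_ID Table_ID Table_ID_alt
  rw [tableLoopA_eq, foldl_run_eq, List.reverse_reverse, List.nil_append]
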